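-- pv_equiv track=rewrite | github.com/dobermanch/dev-quests | src/python/problems/largest_altitude_test.py | Solution
-- ===== SOURCE A (Python) =====
-- def Solution(gain: list[int]) -> int:
--     result = 0
--     current = 0
--     for i in range(len(gain)):
--         current += gain[i]
--         if current > result:
--             result = current
--
--     return result
-- ===== SOURCE B (Python) =====
-- def Solution(gain: list[int]) -> int:
--     # Backward recurrence: the highest prefix altitude of g::rest is
--     # max(0, g + highest-prefix-altitude(rest)); fold it right-to-left.
--     best = 0
--     for g in reversed(gain):
--         best = max(0, g + best)
--     return best
-- ===== Notes on version B (the rewrite author's own statement) =====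
-- stated objective: alternative
-- what changed: Replaces A's forward pass that maintains the current altitude and a running maximum by a right-to-left fold of the suffix recurrence best = max(0, g + best), which never computes prefix sums or tracks a separate maximum.
import Mathlib
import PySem

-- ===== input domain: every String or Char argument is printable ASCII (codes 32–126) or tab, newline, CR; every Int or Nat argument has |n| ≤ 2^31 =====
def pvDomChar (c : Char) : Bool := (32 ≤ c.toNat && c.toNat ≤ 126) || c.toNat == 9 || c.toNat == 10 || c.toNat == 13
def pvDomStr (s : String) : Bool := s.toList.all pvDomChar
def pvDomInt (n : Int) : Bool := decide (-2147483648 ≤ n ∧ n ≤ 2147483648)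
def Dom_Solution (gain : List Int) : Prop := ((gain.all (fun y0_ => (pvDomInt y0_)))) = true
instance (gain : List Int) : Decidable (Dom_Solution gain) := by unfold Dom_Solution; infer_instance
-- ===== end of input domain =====

-- B folds the suffix recurrence max(0, g + best) right-to-left instead of A's
-- forward pass with a current altitude and running maximum (alternative decomposition).

-- ===== PORT A =====
-- for i in range(len(gain)): current += gain[i]; if current > result: result = current
def Solution (gain : List Int) : Int :=
  ((PySem.List.pyRange 0 (PySem.List.len gain) 1).foldl
    (fun (rc : Int × Int) i =>
      let c := rc.2 + PySem.List.pyGetD gain i 0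
      (if c > rc.1 then c else rc.1, c))
    (0, 0)).1

-- ===== PORT B =====
-- best = 0; for g in reversed(gain): best = max(0, g + best)
def Solution_alt (gain : List Int) : Int :=
  gain.reverse.foldl (fun best g => max 0 (g + best)) 0

-- ===== PRECONDITION & SPEC =====
def Spec_Solution (gain : List Int) (out : Int) : Prop := out = Solution_alt gain
instance (gain : List Int) (out : Int) : Decidable (Spec_Solution gain out) := by unfold Spec_Solution; infer_instance

-- ===== CLAIM =====
def Claim_equal_Solution : Prop := ∀ (gain : List Int), Dom_Solution gain → Spec_Solution gain (Solution gain)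

-- ===== LEMMAS AND PROOFS =====

-- pvF = the right-fold B computes (after rewriting the reversed foldl as a foldr)
def pvF (gs : List Int) : Int := gs.foldr (fun g best => max 0 (g + best)) 0

theorem pvF_nonneg (gs : List Int) : 0 ≤ pvF gs := by
  cases gs with
  | nil => simp [pvF]
  | cons g t => simp [pvF, List.foldr]

theorem foldl_step_fst (gs : List Int) (r c : Int) (h : c ≤ r) :
    (gs.foldl (fun (rc : Int × Int) g =>
      (if rc.2 + g > rc.1 then rc.2 + g else rc.1, rc.2 + g)) (r, c)).1
    = max r (c + pvF gs) := by
  induction gs generalizing r c with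
  | nil => simp [pvF]; omega
  | cons g t ih =>
    simp only [List.foldl]
    rw [ih (if c + g > r then c + g else r) (c + g) (by split_ifs <;> omega)]
    have h0 := pvF_nonneg t
    simp only [pvF, List.foldr] at *
    split_ifs <;> omega

theorem Solution_spec : Claim_equal_Solution := by
  intro gain _
  show Solution gain = Solution_alt gain
  unfold Solution Solution_alt
  rw [PySem.List.foldl_pyRange_zero_pyGetD gain 0
      (fun (rc : Int × Int) g => (if rc.2 + g > rc.1 then rc.2 + g else rc.1, rc.2 + g)) (0, 0)]
  rw [foldl_step_fst gain 0 0 le_rfl, List.foldl_reverse]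
  have h0 := pvF_nonneg gain
  simp only [pvF] at *
  omega
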